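-- pv_equiv track=rewrite | github.com/jyothivedurada/KaggleDocGen | ast_split_model/split_cell_by_ast.py | add_dummy_code
-- ===== SOURCE A (Python) =====
-- def add_dummy_code(code_lines):
--   for i in range(len(code_lines)):
--     if(len(code_lines[i].strip()) == 0):
--       j = i+1
--       while(j < len(code_lines)):
--         if(len(code_lines[j].strip()) != 0):
--           gap_length = len(code_lines[j]) - len(code_lines[j].lstrip())
--           code_lines[i] = (" " * gap_length) + "dummy()"
--           break
--         j += 1
--       else:
--         code_lines[i] += "dummy()"
--   return code_lines
-- ===== SOURCE B (Python) =====
-- def add_dummy_code(code_lines):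
--     indent = None
--     for i in range(len(code_lines) - 1, -1, -1):
--         line = code_lines[i]
--         if line.strip():
--             indent = len(line) - len(line.lstrip())
--         elif indent is None:
--             code_lines[i] = line + "dummy()"
--         else:
--             code_lines[i] = " " * indent + "dummy()"
--     return code_lines
-- ===== Notes on version B (the rewrite author's own statement) =====
-- stated objective: alternative
-- what changed: Replaced the forward loop with a nested forward scan for the next non-empty line by a single backward pass that tracks the indentation of the last non-empty line seen.
import Mathlib
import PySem

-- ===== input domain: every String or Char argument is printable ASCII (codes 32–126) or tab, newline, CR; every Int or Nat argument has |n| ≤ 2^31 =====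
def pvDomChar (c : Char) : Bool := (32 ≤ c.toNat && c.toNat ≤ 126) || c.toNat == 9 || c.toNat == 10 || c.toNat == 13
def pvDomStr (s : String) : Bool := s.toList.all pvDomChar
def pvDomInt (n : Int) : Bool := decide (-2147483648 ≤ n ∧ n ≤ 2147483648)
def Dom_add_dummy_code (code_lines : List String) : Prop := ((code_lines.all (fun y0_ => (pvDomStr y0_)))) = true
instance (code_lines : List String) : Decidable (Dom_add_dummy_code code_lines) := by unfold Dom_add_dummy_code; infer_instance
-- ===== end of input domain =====

-- B replaces A's per-blank-line forward scan by one backward pass tracking the next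
-- non-empty line's indentation (objective: alternative); both mutate the list to the same state.


-- ===== PORT A =====
-- the inner 'while j < len(code_lines): …' scan for the next non-empty line; returns the
-- replacement string if the scan breaks, none if it falls through to the 'else' clause
def add_dummy_code_while (lines : List String) (j : Nat) : Option String :=
  if h : j < lines.length then
    let lj := lines[j]
    if (PySem.Str.strip lj).toList.length ≠ 0 then
      some (String.mk (List.replicate (lj.toList.length - (PySem.Str.lstrip lj).toList.length) ' ' ++ "dummy()".toList))
    else add_dummy_code_while lines (j + 1)
  else none
termination_by lines.length - j

-- the outer 'for i in range(len(code_lines))' loop; the index list range(len) is computed once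
def add_dummy_code_loop (lines : List String) : List Nat → List String
  | [] => lines
  | i :: rest =>
    let li := lines.getD i ""
    let lines' :=
      if (PySem.Str.strip li).toList.length = 0 then
        match add_dummy_code_while lines (i + 1) with
        | some s => lines.set i s
        | none => lines.set i (String.mk (li.toList ++ "dummy()".toList))
      else lines
    add_dummy_code_loop lines' rest

def add_dummy_code (code_lines : List String) : List String :=
  add_dummy_code_loop code_lines (List.range code_lines.length)

-- ===== PORT B =====
-- backward pass: returns the rewritten suffix together with the indentation of its first
-- non-empty line (none if the suffix has no non-empty line)
def add_dummy_code_alt_go : List String → List String × Option Nat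
  | [] => ([], none)
  | l :: ls =>
    let (rest, indent) := add_dummy_code_alt_go ls
    if (PySem.Str.strip l).toList.length ≠ 0 then
      (l :: rest, some (l.toList.length - (PySem.Str.lstrip l).toList.length))
    else
      match indent with
      | none => (String.mk (l.toList ++ "dummy()".toList) :: rest, none)
      | some g => (String.mk (List.replicate g ' ' ++ "dummy()".toList) :: rest, indent)

def add_dummy_code_alt (code_lines : List String) : List String :=
  (add_dummy_code_alt_go code_lines).1

-- ===== PRECONDITION & SPEC =====
def Spec_add_dummy_code (code_lines : List String) (out : List String) : Prop := out = add_dummy_code_alt code_lines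
instance (code_lines : List String) (out : List String) : Decidable (Spec_add_dummy_code code_lines out) := by unfold Spec_add_dummy_code; infer_instance

-- ===== CLAIM (what is proved, stated in full; the proofs are below) =====
def Claim_equal_add_dummy_code : Prop := ∀ (code_lines : List String), Dom_add_dummy_code code_lines → Spec_add_dummy_code code_lines (add_dummy_code code_lines)

-- ===== LEMMAS AND PROOFS =====

-- A's inner scan over the suffix ls computes exactly the replacement string B derives
-- from the indentation (go ls).2 it tracks
theorem while_eq_go_snd (ls pre : List String) :
    add_dummy_code_while (pre ++ ls) pre.length
      = (add_dummy_code_alt_go ls).2.map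
          (fun g => String.mk (List.replicate g ' ' ++ "dummy()".toList)) := by
  induction ls generalizing pre with
  | nil =>
    rw [add_dummy_code_while]
    simp [add_dummy_code_alt_go]
  | cons l ls ih =>
    rw [add_dummy_code_while]
    have hlt : pre.length < (pre ++ l :: ls).length := by simp
    have hget : (pre ++ l :: ls)[pre.length] = l := List.getElem_of_append rfl rfl
    rw [dif_pos hlt]
    simp only [hget]
    by_cases hc : (PySem.Str.strip l).toList.length = 0
    all_goals simp only [PySem.Str.toList_strip, List.length_eq_zero_iff] at hc
    · have hrec : add_dummy_code_while (pre ++ l :: ls) (pre.length + 1)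
          = (add_dummy_code_alt_go ls).2.map
              (fun g => String.mk (List.replicate g ' ' ++ "dummy()".toList)) := by
        have h1 : pre ++ l :: ls = (pre ++ [l]) ++ ls := by simp
        have h2 : pre.length + 1 = (pre ++ [l]).length := by simp
        rw [h1, h2, ih]
      cases h2 : (add_dummy_code_alt_go ls).2 <;>
        simp [add_dummy_code_alt_go, hc, h2, hrec]
    · simp [add_dummy_code_alt_go, hc]

-- main invariant: A's outer loop, started past an already-processed prefix, rewrites the
-- remaining suffix exactly as B's backward pass does
theorem loop_eq_go_fst (ls pre : List String) :
    add_dummy_code_loop (pre ++ ls) (List.range' pre.length ls.length)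
      = pre ++ (add_dummy_code_alt_go ls).1 := by
  induction ls generalizing pre with
  | nil => simp [add_dummy_code_loop, add_dummy_code_alt_go]
  | cons l ls ih =>
    rw [List.length_cons, List.range'_succ, add_dummy_code_loop]
    have hget : (pre ++ l :: ls).getD pre.length "" = l := by
      simp [List.getD_eq_getElem?_getD]
    have hwhile : add_dummy_code_while (pre ++ l :: ls) (pre.length + 1)
        = (add_dummy_code_alt_go ls).2.map
            (fun g => String.mk (List.replicate g ' ' ++ "dummy()".toList)) := by
      have h1 : pre ++ l :: ls = (pre ++ [l]) ++ ls := by simp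
      have h2 : pre.length + 1 = (pre ++ [l]).length := by simp
      rw [h1, h2, while_eq_go_snd]
    simp only [hget]
    by_cases hc : (PySem.Str.strip l).toList.length = 0
    · rw [if_pos hc]
      cases h2 : (add_dummy_code_alt_go ls).2 with
      | none =>
        rw [h2] at hwhile
        simp only [hwhile, Option.map_none]
        have hset : (pre ++ l :: ls).set pre.length (String.mk (l.toList ++ "dummy()".toList))
            = pre ++ String.mk (l.toList ++ "dummy()".toList) :: ls := by simp
        rw [hset]
        have h1 : pre ++ String.mk (l.toList ++ "dummy()".toList) :: ls
            = (pre ++ [String.mk (l.toList ++ "dummy()".toList)]) ++ ls := by simp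
        have h3 : pre.length + 1 = (pre ++ [String.mk (l.toList ++ "dummy()".toList)]).length := by simp
        rw [h1, h3, ih]
        simp only [PySem.Str.toList_strip, List.length_eq_zero_iff] at hc
        simp [add_dummy_code_alt_go, hc, h2]
      | some g =>
        rw [h2] at hwhile
        simp only [hwhile, Option.map_some]
        have hset : (pre ++ l :: ls).set pre.length (String.mk (List.replicate g ' ' ++ "dummy()".toList))
            = pre ++ String.mk (List.replicate g ' ' ++ "dummy()".toList) :: ls := by simp
        rw [hset]
        have h1 : pre ++ String.mk (List.replicate g ' ' ++ "dummy()".toList) :: ls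
            = (pre ++ [String.mk (List.replicate g ' ' ++ "dummy()".toList)]) ++ ls := by simp
        have h3 : pre.length + 1 = (pre ++ [String.mk (List.replicate g ' ' ++ "dummy()".toList)]).length := by simp
        rw [h1, h3, ih]
        simp only [PySem.Str.toList_strip, List.length_eq_zero_iff] at hc
        simp [add_dummy_code_alt_go, hc, h2]
    · rw [if_neg hc]
      have h1 : pre ++ l :: ls = (pre ++ [l]) ++ ls := by simp
      have h3 : pre.length + 1 = (pre ++ [l]).length := by simp
      rw [h1, h3, ih]
      simp only [PySem.Str.toList_strip, List.length_eq_zero_iff] at hc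
      simp [add_dummy_code_alt_go, hc]

-- ===== VERDICT (by name: the statement is the Claim_ definition above) =====
theorem add_dummy_code_spec : Claim_equal_add_dummy_code := by
  intro cl _
  show add_dummy_code cl = add_dummy_code_alt cl
  have h := loop_eq_go_fst cl []
  simpa [add_dummy_code, add_dummy_code_alt, List.range_eq_range'] using h
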